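-- pv_equiv track=rewrite | github.com/haytham10/FrenchNovelProcessor | src/rewriters/ai_rewriter_backup.py | _split_at_breakpoints
-- ===== SOURCE A (Python) =====
-- from typing import List, Tuple, Dict, Optional
--
-- def _split_at_breakpoints(text: str, limit: int) -> List[str]:
--     """
--     Split long sentence at natural French breakpoints.
--     CRITICAL: Never create fragments like ". Je" or ", elle" - these are incomplete!
--     Only break at safe points that create complete phrases.
--     """
--     words = text.split()
--     if len(words) <= limit:
--         return [text]
--
--     # BAD BREAKPOINT INDICATORS - never split before these
--     bad_starts = {'je', 'tu', 'il', 'elle', 'on', 'nous', 'vous', 'ils', 'elles',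
--                   'le', 'la', 'les', 'un', 'une', 'des', 'mon', 'ma', 'mes',
--                   'ton', 'ta', 'tes', 'son', 'sa', 'ses', 'ce', 'cet', 'cette'}
--
--     # Find SAFE breakpoint positions
--     breakpoints = []
--     for i in range(1, len(words) - 1):  # Never break at very start or end
--         word = words[i]
--         prev_word = words[i-1]
--         next_word = words[i+1] if i+1 < len(words) else ""
--
--         lower = word.lower().rstrip('.,;:!?')
--         next_lower = next_word.lower().rstrip('.,;:!?')
--
--         # Check if next word would make a bad start
--         if next_lower in bad_starts:
--             continue  # Skip this breakpoint - would create ". Je" or similar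
--
--         # SAFE breakpoints: period/exclamation followed by capital letter
--         if prev_word.rstrip() in ['.', '!', '?'] and word[0].isupper():
--             breakpoints.append(i)
--         # Coordinating conjunctions (break AFTER, but check what follows)
--         elif lower in ['et', 'mais', 'ou', 'car', 'donc'] and next_lower not in bad_starts:
--             breakpoints.append(i + 1)
--
--     # Use breakpoints to create chunks of ~limit words
--     if not breakpoints:
--         # No safe breakpoints - just chunk by limit (best we can do)
--         return [' '.join(words[i:i+limit]) for i in range(0, len(words), limit)]
--
--     # Smart chunking: aim for chunks close to limit
--     chunks = []
--     start = 0
--     for bp in breakpoints: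
--         chunk_size = bp - start
--         # Take this breakpoint if chunk is reasonable size (4 to limit+2 words)
--         if 4 <= chunk_size <= limit + 2:
--             chunks.append(' '.join(words[start:bp]))
--             start = bp
--         # If chunk would be too long, force split at limit
--         elif chunk_size > limit + 2:
--             chunks.append(' '.join(words[start:start+limit]))
--             start = start + limit
--
--     # Don't forget remaining words
--     if start < len(words):
--         remaining = words[start:]
--         if len(remaining) <= limit:
--             chunks.append(' '.join(remaining))
--         else:
--             # Split remainder by limit
--             for i in range(0, len(remaining), limit):
--                 chunks.append(' '.join(remaining[i:i+limit]))
--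
--     return [c for c in chunks if c]
-- ===== SOURCE B (Python) =====
-- from typing import List, Optional
--
-- _BAD_STARTS = {'je', 'tu', 'il', 'elle', 'on', 'nous', 'vous', 'ils', 'elles',
--                'le', 'la', 'les', 'un', 'une', 'des', 'mon', 'ma', 'mes',
--                'ton', 'ta', 'tes', 'son', 'sa', 'ses', 'ce', 'cet', 'cette'}
--
-- _PUNCT = '.,;:!?'
--
--
-- def _breakpoint_at(prev: str, word: str, nxt: str, i: int) -> Optional[int]:
--     """Breakpoint contributed by the triple (words[i-1], words[i], words[i+1]), or None."""
--     if nxt.lower().rstrip(_PUNCT) in _BAD_STARTS: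
--         return None
--     if prev.rstrip() in ('.', '!', '?') and word[0].isupper():
--         return i
--     if word.lower().rstrip(_PUNCT) in ('et', 'mais', 'ou', 'car', 'donc'):
--         return i + 1
--     return None
--
--
-- def _cut_bounds(bps: List[int], start: int, n: int, limit: int) -> List[int]:
--     """Right boundaries of the successive chunks, by recursion over the breakpoints;
--     once they are exhausted, step the remaining words by `limit`."""
--     if not bps:
--         tail = []
--         while start < n and limit > 0:
--             start += limit
--             tail.append(start)
--         return tail
--     bp, rest = bps[0], bps[1:]
--     size = bp - start
--     if 4 <= size <= limit + 2:
--         return [bp] + _cut_bounds(rest, bp, n, limit)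
--     if size > limit + 2:
--         return [start + limit] + _cut_bounds(rest, start + limit, n, limit)
--     return _cut_bounds(rest, start, n, limit)
--
--
-- def _split_at_breakpoints(text: str, limit: int) -> List[str]:
--     """Boundary-list formulation: compute every cut position first, then materialise
--     all chunks uniformly as the slices between consecutive boundaries."""
--     words = text.split()
--     n = len(words)
--     if n <= limit:
--         return [text]
--
--     bps = [b for i, t in enumerate(zip(words, words[1:], words[2:]), 1)
--            if (b := _breakpoint_at(*t, i)) is not None]
--     bounds = _cut_bounds(bps, 0, n, limit)
--     chunks = [' '.join(words[a:b]) for a, b in zip([0] + bounds, bounds)]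
--     return [c for c in chunks if c]
-- ===== Notes on version B (the rewrite author's own statement) =====
-- stated objective: alternative
-- what changed: B detects breakpoints with a comprehension over zipped (prev, word, next) triples instead of an index loop, and replaces A's three chunk-emitting code paths (stateful emission fold over the breakpoints, a separate remainder block, and a distinct no-breakpoint fallback) by one recursively computed list of cut boundaries from which every chunk is materialised uniformly as the slice between consecutive boundaries.
import Mathlib
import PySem

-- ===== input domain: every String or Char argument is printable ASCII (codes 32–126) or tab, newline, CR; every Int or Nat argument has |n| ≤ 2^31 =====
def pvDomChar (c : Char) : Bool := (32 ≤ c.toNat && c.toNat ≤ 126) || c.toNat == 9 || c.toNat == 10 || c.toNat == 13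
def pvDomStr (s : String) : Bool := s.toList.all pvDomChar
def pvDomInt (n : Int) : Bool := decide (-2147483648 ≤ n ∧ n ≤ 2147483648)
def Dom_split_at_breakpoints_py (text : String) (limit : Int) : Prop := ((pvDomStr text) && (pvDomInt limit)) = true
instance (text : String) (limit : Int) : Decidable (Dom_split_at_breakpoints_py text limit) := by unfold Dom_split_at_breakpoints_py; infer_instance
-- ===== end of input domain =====

-- B re-decomposes A: breakpoints come from a comprehension over (prev, word, next) triples, and
-- instead of A's three chunk-emitting code paths B computes one list of cut boundaries and
-- materialises every chunk as the slice between consecutive boundaries (objective: alternative).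

-- ===== PORT A =====
-- the bad-start word set (a Python set literal of distinct strings; membership test only)
def pvBadStarts : List String :=
  ["je", "tu", "il", "elle", "on", "nous", "vous", "ils", "elles",
   "le", "la", "les", "un", "une", "des", "mon", "ma", "mes",
   "ton", "ta", "tes", "son", "sa", "ses", "ce", "cet", "cette"]

-- s.rstrip('.,;:!?'): drop trailing characters from that set (hand port, exact: str.rstrip with a
-- chars argument removes the longest trailing run of characters belonging to the set)
def pvRstripPunct (s : String) : String :=
  String.ofList ((s.toList.reverse.dropWhile (fun c => (".,;:!?".toList).contains c)).reverse)

-- the body of A's detection loop at index i: the breakpoint this i contributes, if any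
-- (words[i][0] via pyGet?: none cannot occur, split() yields non-empty words)
def pvCand (words : List String) (i : Int) : Option Int :=
  let word := (PySem.List.pyGet? words i).getD ""
  let prev_word := (PySem.List.pyGet? words (i - 1)).getD ""
  let next_word := if i + 1 < (words.length : Int) then (PySem.List.pyGet? words (i + 1)).getD "" else ""
  let lower := pvRstripPunct (PySem.Str.lower word)
  let next_lower := pvRstripPunct (PySem.Str.lower next_word)
  if pvBadStarts.contains next_lower then none
  else if (([".", "!", "?"] : List String).contains (PySem.Str.rstrip prev_word))
          && (match PySem.Str.pyGet? word 0 with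
              | some c => PySem.Chars.isupper c
              | none => false) then some i
  else if ((["et", "mais", "ou", "car", "donc"] : List String).contains lower)
          && !(pvBadStarts.contains next_lower) then some (i + 1)
  else none

-- [' '.join(words[i:i+limit]) for i in range(0, len(words), limit)]
def pvChunkByLimit (words : List String) (limit : Int) : List String :=
  (PySem.List.pyRange 0 (words.length : Int) limit).map
    (fun i => PySem.Str.join " " (PySem.List.slice words (some i) (some (i + limit))))

-- the body of A's chunk-emission loop: state (chunks, start), one breakpoint bp
def pvChunkStep (words : List String) (limit : Int)
    (s : List String × Int) (bp : Int) : List String × Int :=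
  let size := bp - s.2
  if 4 ≤ size ∧ size ≤ limit + 2 then
    (s.1 ++ [PySem.Str.join " " (PySem.List.slice words (some s.2) (some bp))], bp)
  else if limit + 2 < size then
    (s.1 ++ [PySem.Str.join " " (PySem.List.slice words (some s.2) (some (s.2 + limit)))], s.2 + limit)
  else s

-- the trailing "don't forget remaining words" block
def pvRest (words chunks : List String) (limit start : Int) : List String :=
  if start < (words.length : Int) then
    let remaining := PySem.List.slice words (some start) none
    if (remaining.length : Int) ≤ limit then
      chunks ++ [PySem.Str.join " " remaining]
    else
      chunks ++ pvChunkByLimit remaining limit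
  else chunks

def split_at_breakpoints_py (text : String) (limit : Int) : List String :=
  let words := PySem.Str.split₀ text
  if (words.length : Int) ≤ limit then [text]
  else
    -- phase 1: collect all safe breakpoints
    let breakpoints := (PySem.List.pyRange 1 ((words.length : Int) - 1)).foldl
      (fun acc i => match pvCand words i with
                    | some bp => acc ++ [bp]
                    | none => acc) []
    if breakpoints.isEmpty then pvChunkByLimit words limit
    else
      -- phase 2: walk the collected breakpoints
      let p := breakpoints.foldl (pvChunkStep words limit) ([], 0)
      (pvRest words p.1 limit p.2).filter (fun c => !(c == ""))

-- ===== PORT B =====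
-- _breakpoint_at(prev, word, nxt, i): the breakpoint contributed by one (prev, word, next) triple
def pvAltBp (prev word nxt : String) (i : Int) : Option Int :=
  if pvBadStarts.contains (pvRstripPunct (PySem.Str.lower nxt)) then none
  else if (([".", "!", "?"] : List String).contains (PySem.Str.rstrip prev))
          && (match PySem.Str.pyGet? word 0 with
              | some c => PySem.Chars.isupper c
              | none => false) then some i
  else if (["et", "mais", "ou", "car", "donc"] : List String).contains
            (pvRstripPunct (PySem.Str.lower word)) then some (i + 1)
  else none

-- the trailing while loop of _cut_bounds: step the remaining words by `limit`
def pvTail (n limit start : Int) : List Int :=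
  if h : start < n ∧ 0 < limit then (start + limit) :: pvTail n limit (start + limit)
  else []
termination_by (n - start).toNat
decreasing_by omega

-- _cut_bounds: recursion over the breakpoints
def pvCutBounds (n limit : Int) : List Int → Int → List Int
  | [], start => pvTail n limit start
  | bp :: rest, start =>
    if 4 ≤ bp - start ∧ bp - start ≤ limit + 2 then bp :: pvCutBounds n limit rest bp
    else if limit + 2 < bp - start then (start + limit) :: pvCutBounds n limit rest (start + limit)
    else pvCutBounds n limit rest start

def split_at_breakpoints_py_alt (text : String) (limit : Int) : List String :=
  let words := PySem.Str.split₀ text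
  if (words.length : Int) ≤ limit then [text]
  else
    -- breakpoints from enumerate(zip(words, words[1:], words[2:]), 1)
    let bps := (PySem.List.enumerate
        (words.zip ((PySem.List.slice words (some 1) none).zip (PySem.List.slice words (some 2) none))) 1).filterMap
      (fun p => pvAltBp p.2.1 p.2.2.1 p.2.2.2 p.1)
    let bounds := pvCutBounds (words.length : Int) limit bps 0
    ((((0 : Int) :: bounds).zip bounds).map
      (fun p => PySem.Str.join " " (PySem.List.slice words (some p.1) (some p.2)))).filter
      (fun c => !(c == ""))

-- ===== PRECONDITION & SPEC =====
-- Pre_ excludes exactly the inputs where the Python A raises (ValueError from range(..., 0)):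
-- limit = 0 with at least one word in the text.
def Pre_split_at_breakpoints_py (text : String) (limit : Int) : Prop :=
  limit = 0 → PySem.Str.split₀ text = []
instance (text : String) (limit : Int) : Decidable (Pre_split_at_breakpoints_py text limit) := by
  unfold Pre_split_at_breakpoints_py; infer_instance

def pvWitness_split_at_breakpoints_py : String × Int := ("Il dort . Mais non et puis", 2)

def Spec_split_at_breakpoints_py (text : String) (limit : Int) (out : List String) : Prop :=
  out = split_at_breakpoints_py_alt text limit
instance (text : String) (limit : Int) (out : List String) :
    Decidable (Spec_split_at_breakpoints_py text limit out) := by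
  unfold Spec_split_at_breakpoints_py; infer_instance

-- ===== CLAIM (what is proved, stated in full; the proofs are below) =====
def Claim_equal_split_at_breakpoints_py : Prop :=
  ∀ (text : String) (limit : Int), Dom_split_at_breakpoints_py text limit →
    Pre_split_at_breakpoints_py text limit →
    Spec_split_at_breakpoints_py text limit (split_at_breakpoints_py text limit)

-- ===== LEMMAS AND PROOFS =====

-- B's chunk list from a boundary list, seen from an arbitrary left end (proof helper)
def pvPairs (ws : List String) (st : Int) (bs : List Int) : List String :=
  ((st :: bs).zip bs).map (fun p => PySem.Str.join " " (PySem.List.slice ws (some p.1) (some p.2)))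

theorem pvPairs_nil (ws : List String) (st : Int) : pvPairs ws st [] = [] := rfl

theorem pvPairs_cons (ws : List String) (st b : Int) (bs : List Int) :
    pvPairs ws st (b :: bs) =
      PySem.Str.join " " (PySem.List.slice ws (some st) (some b)) :: pvPairs ws b bs := rfl

-- phase 1 of A is a filterMap of the candidate function over the index range
theorem pv_gen (f : Int → Option Int) (l : List Int) (acc : List Int) :
    l.foldl (fun acc i => match f i with
                          | some bp => acc ++ [bp]
                          | none => acc) acc = acc ++ l.filterMap f := by
  induction l generalizing acc with
  | nil => simp
  | cons hd tl ih =>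
    cases h : f hd <;> simp [List.foldl_cons, h, ih]

-- pvRest only ever appends to the chunks it is given
theorem pvRest_append (ws cs : List String) (limit st : Int) :
    pvRest ws cs limit st = cs ++ pvRest ws [] limit st := by
  unfold pvRest; dsimp only; split_ifs <;> simp

-- the chunk-emission fold only ever appends to its first component
theorem pvFold_acc (ws : List String) (limit : Int) (l : List Int) (acc : List String) (st : Int) :
    List.foldl (pvChunkStep ws limit) (acc, st) l =
      (acc ++ (List.foldl (pvChunkStep ws limit) ([], st) l).1,
       (List.foldl (pvChunkStep ws limit) ([], st) l).2) := by
  have hstep : ∀ (acc : List String) (st bp : Int),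
      pvChunkStep ws limit (acc, st) bp =
        (acc ++ (pvChunkStep ws limit ([], st) bp).1, (pvChunkStep ws limit ([], st) bp).2) := by
    intro acc st bp
    unfold pvChunkStep; dsimp only; split_ifs <;> simp
  induction l generalizing acc st with
  | nil => simp
  | cons hd tl ih =>
    rw [List.foldl_cons, List.foldl_cons, hstep, ih,
        ih (pvChunkStep ws limit ([], st) hd).1 (pvChunkStep ws limit ([], st) hd).2]
    simp

-- enumerate as a map over indices
theorem pvEnum {α : Type} (xs : List α) (d : α) :
    ∀ s : Int, PySem.List.enumerate xs s =
      (List.range xs.length).map (fun k : Nat => ((s + (k : Int)), xs.getD k d)) := by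
  induction xs with
  | nil => intro s; simp [PySem.List.enumerate]
  | cons x t ih =>
    intro s
    rw [PySem.List.enumerate_cons, ih]
    simp only [List.length_cons, List.range_succ_eq_map, List.map_cons, List.map_map]
    congr 1
    · simp
    · apply List.map_congr_left
      intro k _
      simp only [Function.comp_apply, Nat.succ_eq_add_one, List.getD_cons_succ]
      congr 1
      push_cast; ring

-- positive / negative step ranges: nil, cons-unroll, shift
theorem pvRange_pos_nil {a b s : Int} (hs : 0 < s) (h : b ≤ a) :
    PySem.List.pyRange a b s = [] := by
  rw [PySem.List.pyRange_of_pos a b hs]; simp [show ¬ a < b by omega]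

theorem pvRange_neg_nil {a b s : Int} (hs : s < 0) (h : a ≤ b) :
    PySem.List.pyRange a b s = [] := by
  rw [PySem.List.pyRange_of_neg a b hs]; simp [show ¬ b < a by omega]

theorem pvRange_pos_cons {a b s : Int} (hs : 0 < s) (h : a < b) :
    PySem.List.pyRange a b s = a :: PySem.List.pyRange (a + s) b s := by
  rw [PySem.List.pyRange_of_pos a b hs, PySem.List.pyRange_of_pos (a+s) b hs]
  rw [if_pos h]
  have hq : 0 ≤ (b - a - 1) / s := Int.ediv_nonneg (by omega) (le_of_lt hs)
  have h1 : b - a + s - 1 = (b - a - 1) + 1 * s := by ring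
  have h2 : (b - a + s - 1) / s = (b - a - 1) / s + 1 := by
    rw [h1, Int.add_mul_ediv_right _ _ (ne_of_gt hs)]
  by_cases hab : a + s < b
  · rw [if_pos hab]
    have h3 : b - (a + s) + s - 1 = b - a - 1 := by ring
    have : ((b - a + s - 1) / s).toNat = ((b - (a + s) + s - 1) / s).toNat + 1 := by
      rw [h2, h3]; omega
    rw [this, List.range_succ_eq_map, List.map_cons, List.map_map]
    congr 1
    · simp
    · apply List.map_congr_left
      intro k _
      simp only [Function.comp_apply, Nat.succ_eq_add_one]
      push_cast; ring
  · rw [if_neg hab]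
    have hz : (b - a - 1) / s = 0 := by
      apply Int.ediv_eq_zero_of_lt (by omega) (by omega)
    have : ((b - a + s - 1) / s).toNat = 1 := by rw [h2, hz]; rfl
    rw [this]
    simp

theorem pvRange_pos_shift (a b c : Int) {s : Int} (hs : 0 < s) :
    PySem.List.pyRange (a + c) (b + c) s = (PySem.List.pyRange a b s).map (· + c) := by
  rw [PySem.List.pyRange_of_pos _ _ hs, PySem.List.pyRange_of_pos _ _ hs, List.map_map]
  have : b + c - (a + c) = b - a := by ring
  rw [this]
  have : a + c < b + c ↔ a < b := by omega
  simp only [this]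
  apply List.map_congr_left
  intro k _
  simp; ring

-- every word produced by split() is non-empty
theorem pvSplit_go_ne_nil : ∀ (s cur : List Char) (acc : List (List Char)),
    (∀ w ∈ acc, w ≠ []) → ∀ w ∈ PySem.Chars.split₀.go s cur acc, w ≠ [] := by
  intro s
  induction s with
  | nil =>
    intro cur acc hacc w hw
    unfold PySem.Chars.split₀.go at hw
    by_cases hc : cur.isEmpty
    · simp [hc] at hw; exact hacc w (by simpa using hw)
    · simp [hc] at hw
      rcases hw with h | h
      · exact hacc w h
      · subst h; simp [List.isEmpty_iff] at hc; simpa using hc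
  | cons c rest ih =>
    intro cur acc hacc w hw
    unfold PySem.Chars.split₀.go at hw
    by_cases hsp : PySem.Chars.isspace c
    · by_cases hc : cur.isEmpty
      · simp [hsp, hc] at hw; exact ih [] acc hacc w hw
      · simp [hsp, hc] at hw
        refine ih [] (cur.reverse :: acc) ?_ w hw
        intro u hu
        rcases List.mem_cons.mp hu with h | h
        · subst h; simp [List.isEmpty_iff] at hc; simpa using hc
        · exact hacc u h
    · simp [hsp] at hw
      exact ih (c :: cur) acc hacc w hw

theorem pvSplit_ne_empty (t : String) : ∀ w ∈ PySem.Str.split₀ t, w ≠ "" := by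
  intro w hw
  unfold PySem.Str.split₀ at hw
  rcases List.mem_map.mp hw with ⟨u, hu, rfl⟩
  have hne : u ≠ [] := by
    have := pvSplit_go_ne_nil t.toList [] [] (by simp)
    exact this u (by simpa [PySem.Chars.split₀] using hu)
  intro h
  apply hne
  have := congrArg String.toList h
  simpa using this

-- ' '.join of a non-empty list of non-empty strings is non-empty
theorem pvJoin_ne_empty (l : List String) (hne : l ≠ []) (h : ∀ w ∈ l, w ≠ "") :
    PySem.Str.join " " l ≠ "" := by
  intro hcon
  have hl := congrArg String.toList hcon
  rw [PySem.Str.toList_join] at hl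
  simp at hl
  match l, hne with
  | [w], _ =>
    simp [PySem.Chars.join_singleton] at hl
    exact h w (by simp) hl
  | w₁ :: w₂ :: r, _ =>
    rw [List.map_cons, List.map_cons, PySem.Chars.join_cons_cons] at hl
    simp at hl

-- the candidate test of A at index 1+k equals B's triple test
theorem pvCandAlt (ws : List String) (k : Nat) (hk : k + 2 < ws.length) :
    pvCand ws (1 + (k : Int))
      = pvAltBp (ws.getD k "") (ws.getD (k+1) "") (ws.getD (k+2) "") (1 + (k : Int)) := by
  have e1 : (1 : Int) + (k : Int) = ((k + 1 : Nat) : Int) := by push_cast; ring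
  have e0 : (1 : Int) + (k : Int) - 1 = ((k : Nat) : Int) := by push_cast; ring
  have e2 : (1 : Int) + (k : Int) + 1 = ((k + 2 : Nat) : Int) := by push_cast; ring
  have g1 : (PySem.List.pyGet? ws (1 + (k:Int))).getD "" = ws.getD (k+1) "" := by
    rw [e1, PySem.List.pyGet?_natCast]
    simp [List.getD_eq_getElem?_getD]
  have g0 : (PySem.List.pyGet? ws (1 + (k:Int) - 1)).getD "" = ws.getD k "" := by
    rw [e0, PySem.List.pyGet?_natCast]
    simp [List.getD_eq_getElem?_getD]
  have g2 : (PySem.List.pyGet? ws (1 + (k:Int) + 1)).getD "" = ws.getD (k+2) "" := by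
    rw [e2, PySem.List.pyGet?_natCast]
    simp [List.getD_eq_getElem?_getD]
  have hcond : ((1 : Int) + (k : Int) + 1 < (ws.length : Int)) := by omega
  unfold pvCand pvAltBp
  simp only [if_pos hcond, g1, g0, g2]
  split_ifs <;> simp_all

-- A's detection loop equals B's triple comprehension
theorem pvDetect (ws : List String) :
    (PySem.List.pyRange 1 ((ws.length : Int) - 1)).filterMap (pvCand ws)
      = (PySem.List.enumerate
          (ws.zip ((PySem.List.slice ws (some 1) none).zip (PySem.List.slice ws (some 2) none))) 1).filterMap
          (fun p => pvAltBp p.2.1 p.2.2.1 p.2.2.2 p.1) := by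
  rw [PySem.List.slice_from ws (a := 1) (by norm_num), PySem.List.slice_from ws (a := 2) (by norm_num)]
  have h1 : (1 : Int).toNat = 1 := rfl
  have h2 : (2 : Int).toNat = 2 := rfl
  rw [h1, h2]
  rw [PySem.List.pyRange_one, pvEnum _ ("", ("", "")) 1]
  rw [List.filterMap_map, List.filterMap_map]
  have hlen : (ws.zip ((ws.drop 1).zip (ws.drop 2))).length = (((ws.length : Int)) - 1 - 1).toNat := by
    simp [List.length_zip, List.length_drop]; omega
  rw [hlen]
  apply List.filterMap_congr
  intro k hk
  have hkm : k < (((ws.length : Int)) - 1 - 1).toNat := List.mem_range.mp hk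
  have hk2 : k + 2 < ws.length := by omega
  have hkz : k < (ws.zip ((ws.drop 1).zip (ws.drop 2))).length := by rw [hlen]; exact hkm
  have hT : (ws.zip ((ws.drop 1).zip (ws.drop 2))).getD k ("", ("", ""))
      = (ws.getD k "", (ws.getD (k+1) "", ws.getD (k+2) "")) := by
    rw [List.getD_eq_getElem _ _ hkz]
    simp only [List.getElem_zip, List.getElem_drop]
    rw [List.getD_eq_getElem _ _ (by omega), List.getD_eq_getElem _ _ (by omega),
        List.getD_eq_getElem _ _ (by omega)]
    refine Prod.ext ?_ (Prod.ext ?_ ?_) <;> simp [Nat.add_comm]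
  simp only [Function.comp_apply, hT]
  exact pvCandAlt ws k hk2

-- A's chunk-by-limit comprehension unrolls one chunk at a time
theorem pvCBL_unroll (rem : List String) (limit : Int) (hl : 0 < limit) (hne : rem ≠ []) :
    pvChunkByLimit rem limit =
      PySem.Str.join " " (rem.take limit.toNat) :: pvChunkByLimit (rem.drop limit.toNat) limit := by
  unfold pvChunkByLimit
  have hlen : (0:Int) < (rem.length : Int) := by
    have := List.length_pos_iff.mpr hne; omega
  rw [pvRange_pos_cons hl hlen]
  rw [List.map_cons]
  congr 1
  · rw [PySem.List.slice_toNat rem (by omega) (by omega)]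
    simp
  · by_cases hLl : (rem.length : Int) ≤ limit
    · have hd : rem.drop limit.toNat = [] := by
        apply List.drop_eq_nil_of_le; omega
      rw [pvRange_pos_nil hl (by omega), hd]
      simp [pvRange_pos_nil hl]
    · have : (rem.length : Int) = ((rem.length : Int) - limit) + limit := by ring
      rw [this, show (0:Int) + limit = 0 + limit by rfl,
          pvRange_pos_shift 0 ((rem.length : Int) - limit) limit hl]
      rw [List.map_map]
      have hdl : ((rem.drop limit.toNat).length : Int) = (rem.length : Int) - limit := by
        simp [List.length_drop]; omega
      rw [hdl]
      apply List.map_congr_left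
      intro i hi
      have hi0 : 0 ≤ i := by
        rcases (PySem.List.mem_pyRange_iff_of_pos hl i).mp hi with ⟨h1, _, _⟩; exact h1
      simp only [Function.comp_apply]
      rw [PySem.List.slice_toNat rem (by omega) (by omega),
          PySem.List.slice_toNat (rem.drop limit.toNat) (by omega) (by omega)]
      rw [List.drop_drop]
      congr 1
      congr 1
      · omega
      · congr 1; omega

-- tail lemma: A's remainder block = B's stepped tail boundaries
theorem pvT (ws : List String) (limit : Int) (hl : limit ≠ 0) :
    ∀ st : Int, (0 < limit → 0 ≤ st) →
      pvRest ws [] limit st = pvPairs ws st (pvTail (ws.length : Int) limit st) := by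
  suffices H : ∀ (m : Nat) (st : Int), ((ws.length : Int) - st).toNat = m → (0 < limit → 0 ≤ st) →
      pvRest ws [] limit st = pvPairs ws st (pvTail (ws.length : Int) limit st) by
    intro st hst; exact H _ st rfl hst
  intro m
  induction m using Nat.strong_induction_on with
  | _ m ih =>
    intro st hm hst
    by_cases hsn : st < (ws.length : Int)
    · rcases lt_or_gt_of_ne hl with hneg | hpos
      · -- limit < 0 : both sides empty
        rw [pvTail, dif_neg (by omega), pvPairs_nil]
        unfold pvRest
        rw [if_pos hsn]
        have hrem : ¬ ((PySem.List.slice ws (some st) none).length : Int) ≤ limit := by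
          have : (0:Int) ≤ ((PySem.List.slice ws (some st) none).length : Int) := by positivity
          omega
        simp only [hrem, if_false]
        unfold pvChunkByLimit
        rw [pvRange_neg_nil hneg (by positivity)]
        simp
      · -- 0 < limit, so 0 ≤ st
        have h0 : 0 ≤ st := hst hpos
        have hrem : PySem.List.slice ws (some st) none = ws.drop st.toNat :=
          PySem.List.slice_from ws h0
        have hlen : ((ws.drop st.toNat).length : Int) = (ws.length : Int) - st := by
          simp [List.length_drop]; omega
        rw [pvTail, dif_pos ⟨hsn, hpos⟩]
        unfold pvRest
        rw [if_pos hsn]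
        simp only [hrem, hlen, List.nil_append]
        by_cases hLl : (ws.length : Int) - st ≤ limit
        · rw [if_pos hLl, pvPairs_cons]
          have htail : pvTail (ws.length : Int) limit (st + limit) = [] := by
            rw [pvTail, dif_neg (by omega)]
          rw [htail, pvPairs_nil]
          congr 1
          rw [PySem.List.slice_toNat ws (by omega) (by omega)]
          rw [List.take_of_length_le (by simp [List.length_drop]; omega)]
        · rw [if_neg hLl, pvPairs_cons]
          have hrec := ih (((ws.length : Int) - (st + limit)).toNat) (by omega) (st + limit) rfl
            (fun _ => by omega)
          have hne : ws.drop st.toNat ≠ [] := by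
            intro hcon
            have := congrArg List.length hcon
            simp [List.length_drop] at this
            omega
          have hrem2 : PySem.List.slice ws (some (st + limit)) none = ws.drop (st + limit).toNat :=
            PySem.List.slice_from ws (by omega)
          have hdd : (ws.drop st.toNat).drop limit.toNat = ws.drop (st + limit).toNat := by
            rw [List.drop_drop]; congr 1; omega
          have hhead : PySem.Str.join " " ((ws.drop st.toNat).take limit.toNat)
              = PySem.Str.join " " (PySem.List.slice ws (some st) (some (st + limit))) := by
            rw [PySem.List.slice_toNat ws (by omega) (by omega)]
            congr 2
            omega
          have htail : pvChunkByLimit (ws.drop (st + limit).toNat) limit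
              = pvRest ws [] limit (st + limit) := by
            unfold pvRest
            rw [if_pos (show st + limit < (ws.length : Int) by omega)]
            simp only [hrem2, List.nil_append]
            by_cases hL2 : ((ws.drop (st + limit).toNat).length : Int) ≤ limit
            · rw [if_pos hL2]
              have hne2 : ws.drop (st + limit).toNat ≠ [] := by
                intro hcon
                have := congrArg List.length hcon
                simp [List.length_drop] at this
                omega
              have ht' : (ws.drop (st + limit).toNat).take limit.toNat
                  = ws.drop (st + limit).toNat := List.take_of_length_le (by omega)
              have hd' : (ws.drop (st + limit).toNat).drop limit.toNat = ([] : List String) :=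
                List.drop_eq_nil_of_le (by omega)
              rw [pvCBL_unroll _ limit hpos hne2, ht', hd']
              unfold pvChunkByLimit
              simp [pvRange_pos_nil hpos]
            · rw [if_neg hL2]
          rw [pvCBL_unroll _ limit hpos hne, hdd, htail, hrec, hhead]
    · rw [pvTail, dif_neg (by omega), pvPairs_nil]
      unfold pvRest
      rw [if_neg hsn]

-- main lemma: A's emission fold + remainder = B's boundary chunks
theorem pvC (ws : List String) (limit : Int) (hl : limit ≠ 0) :
    ∀ (l : List Int) (st : Int), (0 < limit → 0 ≤ st) →
      pvRest ws (List.foldl (pvChunkStep ws limit) ([], st) l).1 limit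
          (List.foldl (pvChunkStep ws limit) ([], st) l).2
        = pvPairs ws st (pvCutBounds (ws.length : Int) limit l st) := by
  intro l
  induction l with
  | nil =>
    intro st hst
    simp only [List.foldl_nil]
    exact pvT ws limit hl st hst
  | cons bp rest ih =>
    intro st hst
    rw [List.foldl_cons]
    unfold pvCutBounds
    by_cases h1 : 4 ≤ bp - st ∧ bp - st ≤ limit + 2
    · have hstep : pvChunkStep ws limit ([], st) bp
          = ([PySem.Str.join " " (PySem.List.slice ws (some st) (some bp))], bp) := by
        unfold pvChunkStep; dsimp only; rw [if_pos h1]; simp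
      rw [hstep, pvFold_acc, pvRest_append, if_pos h1, pvPairs_cons]
      simp only [List.cons_append, List.nil_append]
      rw [← pvRest_append]
      rw [ih bp (fun hp => by omega)]
    · by_cases h2 : limit + 2 < bp - st
      · have hstep : pvChunkStep ws limit ([], st) bp
            = ([PySem.Str.join " " (PySem.List.slice ws (some st) (some (st + limit)))], st + limit) := by
          unfold pvChunkStep; dsimp only; rw [if_neg h1, if_pos h2]; simp
        rw [hstep, pvFold_acc, pvRest_append, if_neg h1, if_pos h2, pvPairs_cons]
        simp only [List.cons_append, List.nil_append]
        rw [← pvRest_append]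
        rw [ih (st + limit) (fun hp => by omega)]
      · have hstep : pvChunkStep ws limit ([], st) bp = ([], st) := by
          unfold pvChunkStep; dsimp only; rw [if_neg h1, if_neg h2]
        rw [hstep, if_neg h1, if_neg h2]
        exact ih st hst

-- fallback: with no breakpoints, A's plain chunking equals B's filtered remainder chunks
theorem pvFallback (ws : List String) (limit : Int) (hW : ∀ w ∈ ws, w ≠ "")
    (hnl : ¬ ((ws.length : Int) ≤ limit)) (hl : limit ≠ 0) :
    (pvRest ws [] limit 0).filter (fun c => !(c == "")) = pvChunkByLimit ws limit := by
  rcases lt_or_gt_of_ne hl with hneg | hpos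
  · -- limit < 0 : both sides empty
    have hcbl : ∀ l : List String, pvChunkByLimit l limit = [] := by
      intro l
      unfold pvChunkByLimit
      rw [pvRange_neg_nil hneg (by positivity)]
      simp
    rw [hcbl]
    unfold pvRest
    by_cases h0 : (0:Int) < (ws.length : Int)
    · rw [if_pos h0]
      dsimp only
      rw [if_neg (by
        have : (0:Int) ≤ ((PySem.List.slice ws (some 0) none).length : Int) := by positivity
        omega)]
      rw [hcbl]
      simp
    · rw [if_neg h0]
      simp
  · -- 0 < limit : the filter is a no-op
    have hn : 0 < ws.length := by omega
    unfold pvRest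
    rw [if_pos (by exact_mod_cast hn)]
    dsimp only
    have hsl : PySem.List.slice ws (some 0) none = ws := by
      rw [PySem.List.slice_from ws (by norm_num)]
      simp
    rw [hsl, if_neg hnl]
    rw [List.nil_append]
    apply List.filter_eq_self.mpr
    intro c hc
    rcases List.mem_map.mp hc with ⟨i, hi, rfl⟩
    rcases (PySem.List.mem_pyRange_iff_of_pos hpos i).mp hi with ⟨hi0, hin, _⟩
    have hsne : PySem.List.slice ws (some i) (some (i + limit)) ≠ [] := by
      rw [PySem.List.slice_toNat ws (by omega) (by omega)]
      intro hcon
      have := congrArg List.length hcon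
      simp [List.length_take, List.length_drop] at this
      omega
    have : PySem.Str.join " " (PySem.List.slice ws (some i) (some (i + limit))) ≠ "" := by
      apply pvJoin_ne_empty _ hsne
      intro w hw
      exact hW w (PySem.List.mem_of_mem_slice ws _ _ hw)
    simpa using this

-- ===== VERDICT (by name: the statement is the Claim_ definition above) =====
theorem split_at_breakpoints_py_spec : Claim_equal_split_at_breakpoints_py := by
  intro text limit hdom hpre
  unfold Spec_split_at_breakpoints_py
  unfold split_at_breakpoints_py split_at_breakpoints_py_alt
  by_cases h : (((PySem.Str.split₀ text).length : Int) ≤ limit)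
  · simp [h]
  · simp only [h, if_false]
    have hlim : limit ≠ 0 := by
      intro h0
      rw [hpre h0] at h
      simp [h0] at h
    rw [pv_gen]
    simp only [List.nil_append]
    rw [pvDetect]
    have hpairs : ∀ bs : List Int,
        ((((0 : Int) :: bs).zip bs).map
          (fun p => PySem.Str.join " " (PySem.List.slice (PySem.Str.split₀ text) (some p.1) (some p.2))))
        = pvPairs (PySem.Str.split₀ text) 0 bs := fun bs => rfl
    by_cases hbe : ((PySem.List.enumerate
        ((PySem.Str.split₀ text).zip ((PySem.List.slice (PySem.Str.split₀ text) (some 1) none).zip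
          (PySem.List.slice (PySem.Str.split₀ text) (some 2) none))) 1).filterMap
        (fun p => pvAltBp p.2.1 p.2.2.1 p.2.2.2 p.1)).isEmpty
    · simp only [hbe, if_true]
      have hbsnil := List.isEmpty_iff.mp hbe
      rw [hbsnil, hpairs]
      have hcut : pvCutBounds ((PySem.Str.split₀ text).length : Int) limit [] 0
          = pvTail ((PySem.Str.split₀ text).length : Int) limit 0 := rfl
      rw [hcut, ← pvT (PySem.Str.split₀ text) limit hlim 0 (fun _ => le_refl 0)]
      exact (pvFallback (PySem.Str.split₀ text) limit (pvSplit_ne_empty text) h hlim).symm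
    · rw [if_neg (by simpa using hbe)]
      rw [pvC (PySem.Str.split₀ text) limit hlim _ 0 (fun _ => le_refl 0), hpairs]
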